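-- pv_equiv track=rewrite | github.com/doguzuyar/vinslipp | scripts/rate_wines.py | get_search_variants
-- ===== SOURCE A (Python) =====
-- def get_search_variants(text: str) -> list:
--     if not text:
--         return []
--     parts = text.split("-")
--     variants = set()
--     for i in range(len(parts), 0, -1):
--         variants.add("-".join(parts[:i]))
--     for i in range(len(parts)):
--         variants.add("-".join(parts[i:]))
--     generic = {"chateau", "château", "domaine", "dom", "clos", "maison"}
--     variants = {v for v in variants if v not in generic and len(v) >= 4}
--     return sorted(variants, key=len, reverse=True)
-- ===== SOURCE B (Python) =====
-- def get_search_variants(text: str) -> list: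
--     if not text:
--         return []
--     parts = text.split("-")
--     variants = []
--     acc = parts[0]
--     for p in parts[1:]:             # prefixes, built by one accumulating pass
--         variants.append(acc)
--         acc = acc + "-" + p
--     variants.append(acc)            # acc == text here
--     acc = parts[-1]
--     for p in reversed(parts[:-1]):  # suffixes, built back-to-front
--         variants.append(acc)
--         acc = p + "-" + acc
--     variants.append(acc)
--     generic = {"chateau", "château", "domaine", "dom", "clos", "maison"}
--     keep = [v for v in dict.fromkeys(variants) if v not in generic and len(v) >= 4]
--     return sorted(keep, key=len, reverse=True)
-- ===== Notes on version B (the rewrite author's own statement) =====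
-- stated objective: alternative
-- what changed: B builds the prefix variants by one accumulating left pass and the suffix variants by one accumulating back-to-front pass (threading the growing string) and deduplicates in first-seen order with dict.fromkeys, instead of A's re-slicing of the parts list with a fresh separator join per slice collected into a hash set.
import Mathlib
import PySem

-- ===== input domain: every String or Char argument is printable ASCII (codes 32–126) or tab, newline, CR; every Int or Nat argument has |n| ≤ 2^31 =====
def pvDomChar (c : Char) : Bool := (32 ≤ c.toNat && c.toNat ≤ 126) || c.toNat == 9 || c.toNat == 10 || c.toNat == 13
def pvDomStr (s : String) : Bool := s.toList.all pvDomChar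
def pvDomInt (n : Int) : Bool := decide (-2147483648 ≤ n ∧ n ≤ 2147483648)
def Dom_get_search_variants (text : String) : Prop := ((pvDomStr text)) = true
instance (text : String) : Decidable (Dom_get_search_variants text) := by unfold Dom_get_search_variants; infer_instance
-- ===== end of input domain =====

-- B replaces A's slice-and-rejoin construction of the dash prefix/suffix variants by two accumulating
-- passes over the parts and a first-seen-order dedup (alternative decomposition, same cost).
-- Python string values are modelled as List Char (PySem.Chars is the exact model); the String interface
-- converts at the boundary only.

-- ===== PORT A =====
def get_search_variants (text : String) : List String :=
  if text.toList = [] then []                                   -- if not text: return []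
  else
    let parts : List (List Char) := PySem.Chars.splitOn text.toList ['-']   -- text.split("-")
    let n : Int := (parts.length : Int)
    -- for i in range(len(parts), 0, -1): variants.add("-".join(parts[:i]))
    let variants : PySem.Set (List Char) :=
      (PySem.List.pyRange n 0 (-1)).foldl
        (fun s i => PySem.Set.add s (PySem.Chars.join ['-'] (PySem.List.slice parts none (some i))))
        PySem.Set.empty
    -- for i in range(len(parts)): variants.add("-".join(parts[i:]))
    let variants : PySem.Set (List Char) :=
      (PySem.List.pyRange 0 n 1).foldl
        (fun s i => PySem.Set.add s (PySem.Chars.join ['-'] (PySem.List.slice parts (some i) none)))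
        variants
    let generic : PySem.Set (List Char) :=
      PySem.Set.ofList ["chateau".toList, "château".toList, "domaine".toList,
                        "dom".toList, "clos".toList, "maison".toList]
    -- variants = {v for v in variants if v not in generic and len(v) >= 4}
    let variants : PySem.Set (List Char) :=
      PySem.Set.ofList (variants.filter
        (fun v => !(PySem.Set.contains generic v) && decide (4 ≤ v.length)))
    -- sorted(variants, key=len, reverse=True)
    (PySem.List.sorted variants (fun v => v.length) true).map String.ofList

-- ===== PORT B =====
-- for p in parts[1:]: variants.append(acc); acc = acc + "-" + p   — then variants.append(acc)
def pvPrefChain (acc : List Char) : List (List Char) → List (List Char)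
  | [] => [acc]
  | p :: ps => acc :: pvPrefChain (acc ++ ['-'] ++ p) ps

-- for p in reversed(parts[:-1]): variants.append(acc); acc = p + "-" + acc   — then variants.append(acc)
def pvSufChain (acc : List Char) : List (List Char) → List (List Char)
  | [] => [acc]
  | p :: ps => acc :: pvSufChain (p ++ ['-'] ++ acc) ps

def get_search_variants_alt (text : String) : List String :=
  if text.toList = [] then []                                   -- if not text: return []
  else
    let parts : List (List Char) := PySem.Chars.splitOn text.toList ['-']   -- text.split("-")
    let variants : List (List Char) :=
      pvPrefChain (parts.headD []) parts.tail                   -- acc = parts[0]; loop over parts[1:]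
      ++ pvSufChain (parts.getLastD []) parts.dropLast.reverse  -- acc = parts[-1]; loop over reversed(parts[:-1])
    let generic : PySem.Set (List Char) :=
      PySem.Set.ofList ["chateau".toList, "château".toList, "domaine".toList,
                        "dom".toList, "clos".toList, "maison".toList]
    -- keep = [v for v in dict.fromkeys(variants) if v not in generic and len(v) >= 4]
    let keep : List (List Char) :=
      (PySem.List.dedup variants).filter
        (fun v => !(PySem.Set.contains generic v) && decide (4 ≤ v.length))
    -- sorted(keep, key=len, reverse=True)
    (PySem.List.sorted keep (fun v => v.length) true).map String.ofList

-- ===== PRECONDITION & SPEC =====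
-- helpers for Pre_ (independent of both ports): the candidate variants and the surviving ones
def pvCand (text : String) : List (List Char) :=
  let parts := PySem.Chars.splitOn text.toList ['-']
  ((List.range parts.length).map (fun k => PySem.Chars.join ['-'] (parts.take (k + 1)))) ++
  ((List.range parts.length).map (fun k => PySem.Chars.join ['-'] (parts.drop k)))

def pvKeep (text : String) : List (List Char) :=
  (PySem.Set.ofList (pvCand text)).filter
    (fun v => !(PySem.Set.contains
        (PySem.Set.ofList ["chateau".toList, "château".toList, "domaine".toList,
                           "dom".toList, "clos".toList, "maison".toList]) v)
      && decide (4 ≤ v.length))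

-- Pre_ excludes inputs on which two distinct surviving variants have the same length: there A's
-- order between them is Python's hash-randomized set iteration order, an accident of A's
-- implementation that no port can reproduce.
def Pre_get_search_variants (text : String) : Prop :=
  (pvKeep text).Pairwise (fun a b => a.length ≠ b.length)

instance (text : String) : Decidable (Pre_get_search_variants text) := by
  unfold Pre_get_search_variants; infer_instance

def pvWitness_get_search_variants : String := "abcd-wi"

def Spec_get_search_variants (text : String) (out : List String) : Prop :=
  out = get_search_variants_alt text
instance (text : String) (out : List String) : Decidable (Spec_get_search_variants text out) := by
  unfold Spec_get_search_variants; infer_instance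

-- ===== CLAIM (what is proved, stated in full; the proofs are below) =====
def Claim_equal_get_search_variants : Prop :=
  ∀ (text : String), Dom_get_search_variants text → Pre_get_search_variants text →
    Spec_get_search_variants text (get_search_variants text)

-- ===== LEMMAS AND PROOFS =====

theorem pv_join_cons_ne_nil (x : List Char) {t : List (List Char)} (h : t ≠ []) :
    PySem.Chars.join ['-'] (x :: t) = x ++ ['-'] ++ PySem.Chars.join ['-'] t := by
  cases t with
  | nil => exact absurd rfl h
  | cons q l => exact PySem.Chars.join_cons_cons _ _ _ _

theorem pv_join_glue_left (a b : List Char) (l : List (List Char)) :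
    PySem.Chars.join ['-'] ((a ++ ['-'] ++ b) :: l)
      = a ++ ['-'] ++ PySem.Chars.join ['-'] (b :: l) := by
  cases l with
  | nil => simp [PySem.Chars.join_singleton]
  | cons q l' => simp [PySem.Chars.join_cons_cons, List.append_assoc]

theorem pv_join_glue_right (a b : List Char) (l : List (List Char)) :
    PySem.Chars.join ['-'] (l ++ [a ++ ['-'] ++ b])
      = PySem.Chars.join ['-'] (l ++ [a, b]) := by
  induction l with
  | nil =>
      simp [PySem.Chars.join_singleton, PySem.Chars.join_cons_cons]
  | cons x l' ih =>
      rw [List.cons_append, List.cons_append,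
        pv_join_cons_ne_nil x (by simp), pv_join_cons_ne_nil x (by simp), ih]

theorem pv_pyRange_down (n : Nat) :
    PySem.List.pyRange (n : Int) 0 (-1) = (List.range n).map (fun (k : Nat) => (n : Int) - (k : Int)) := by
  simp only [PySem.List.pyRange]
  norm_num
  rcases Nat.eq_zero_or_pos n with h | h
  · subst h; simp
  · rw [if_pos (by exact_mod_cast h)]
    apply List.map_congr_left
    intro k _
    ring

theorem pv_pyRange_up (n : Nat) :
    PySem.List.pyRange 0 (n : Int) 1 = (List.range n).map (fun (k : Nat) => (k : Int)) := by
  simp only [PySem.List.pyRange]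
  norm_num
  rcases Nat.eq_zero_or_pos n with h | h
  · subst h; simp
  · rw [if_pos (by exact_mod_cast h)]

theorem pv_prefChain_eq (ps : List (List Char)) : ∀ acc,
    pvPrefChain acc ps
      = (List.range (ps.length + 1)).map
          (fun k => PySem.Chars.join ['-'] (acc :: ps.take k)) := by
  induction ps with
  | nil => intro acc; simp [pvPrefChain, PySem.Chars.join_singleton]
  | cons p ps ih =>
      intro acc
      rw [pvPrefChain, ih]
      conv_rhs => rw [List.length_cons, List.range_succ_eq_map]
      rw [List.map_cons, List.map_map]
      congr 1
      · simp [PySem.Chars.join_singleton]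
      · apply List.map_congr_left
        intro k _
        simp only [Function.comp_apply, List.take_succ_cons]
        rw [pv_join_glue_left, pv_join_cons_ne_nil acc (List.cons_ne_nil _ _)]

theorem pv_sufChain_eq (qs : List (List Char)) : ∀ acc,
    pvSufChain acc qs
      = (List.range (qs.length + 1)).map
          (fun k => PySem.Chars.join ['-'] ((qs.take k).reverse ++ [acc])) := by
  induction qs with
  | nil => intro acc; simp [pvSufChain, PySem.Chars.join_singleton]
  | cons q qs ih =>
      intro acc
      rw [pvSufChain, ih]
      conv_rhs => rw [List.length_cons, List.range_succ_eq_map]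
      rw [List.map_cons, List.map_map]
      congr 1
      · simp [PySem.Chars.join_singleton]
      · apply List.map_congr_left
        intro k _
        simp only [Function.comp_apply, List.take_succ_cons, List.reverse_cons]
        rw [pv_join_glue_right]
        simp [List.append_assoc]


theorem pv_candA_pref (parts : List (List Char)) :
    (PySem.List.pyRange (parts.length : Int) 0 (-1)).map
        (fun i => PySem.Chars.join ['-'] (PySem.List.slice parts none (some i)))
      = (List.range parts.length).map
          (fun k => PySem.Chars.join ['-'] (parts.take (parts.length - k))) := by
  rw [pv_pyRange_down, List.map_map]
  apply List.map_congr_left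
  intro k hk
  rw [List.mem_range] at hk
  simp only [Function.comp_apply]
  rw [PySem.List.slice_to parts (by omega)]
  have : ((parts.length : Int) - k).toNat = parts.length - k := by omega
  rw [this]

theorem pv_candA_suf (parts : List (List Char)) :
    (PySem.List.pyRange 0 (parts.length : Int) 1).map
        (fun i => PySem.Chars.join ['-'] (PySem.List.slice parts (some i) none))
      = (List.range parts.length).map
          (fun k => PySem.Chars.join ['-'] (parts.drop k)) := by
  rw [pv_pyRange_up, List.map_map]
  apply List.map_congr_left
  intro k hk
  simp only [Function.comp_apply]
  rw [PySem.List.slice_from parts (by omega)]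
  simp

theorem pv_memA_pref (parts : List (List Char)) (hne : parts ≠ []) (v : List Char) :
    (v ∈ (List.range parts.length).map
        (fun k => PySem.Chars.join ['-'] (parts.take (parts.length - k))))
      ↔ ∃ i < parts.length, v = PySem.Chars.join ['-'] (parts.take (i + 1)) := by
  have hn : 0 < parts.length := List.length_pos_of_ne_nil hne
  simp only [List.mem_map, List.mem_range]
  constructor
  · rintro ⟨k, hk, rfl⟩
    refine ⟨parts.length - k - 1, by omega, ?_⟩
    have : parts.length - k - 1 + 1 = parts.length - k := by omega
    rw [this]
  · rintro ⟨i, hi, rfl⟩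
    refine ⟨parts.length - i - 1, by omega, ?_⟩
    have : parts.length - (parts.length - i - 1) = i + 1 := by omega
    rw [this]

theorem pv_elem_suf (parts : List (List Char)) (hne : parts ≠ []) (k : Nat)
    (hk : k ≤ parts.dropLast.length) :
    (parts.dropLast.reverse.take k).reverse ++ [parts.getLastD []]
      = parts.drop (parts.dropLast.length - k) := by
  rw [List.take_reverse, List.reverse_reverse]
  have hg : parts.getLastD [] = parts.getLast hne := by
    cases parts with
    | nil => exact absurd rfl hne
    | cons a l => simp [List.getLastD_eq_getLast?, List.getLast?_eq_some_getLast]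
  rw [hg, ← List.drop_append_of_le_length (by omega), List.dropLast_append_getLast hne]

theorem pv_memB_suf (parts : List (List Char)) (hne : parts ≠ []) (v : List Char) :
    (v ∈ (List.range (parts.dropLast.reverse.length + 1)).map
        (fun k => PySem.Chars.join ['-']
          ((parts.dropLast.reverse.take k).reverse ++ [parts.getLastD []])))
      ↔ ∃ j < parts.length, v = PySem.Chars.join ['-'] (parts.drop j) := by
  have hm : parts.dropLast.length = parts.length - 1 := by simp
  have hn : 0 < parts.length := List.length_pos_of_ne_nil hne
  simp only [List.mem_map, List.mem_range, List.length_reverse]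
  constructor
  · rintro ⟨k, hk, rfl⟩
    rw [pv_elem_suf parts hne k (by omega)]
    exact ⟨parts.dropLast.length - k, by omega, rfl⟩
  · rintro ⟨j, hj, rfl⟩
    refine ⟨parts.dropLast.length - j, by omega, ?_⟩
    rw [pv_elem_suf parts hne _ (by omega)]
    have : parts.dropLast.length - (parts.dropLast.length - j) = j := by omega
    rw [this]

theorem pv_memA_drop (parts : List (List Char)) (v : List Char) :
    (v ∈ (List.range parts.length).map
        (fun k => PySem.Chars.join ['-'] (parts.drop k)))
      ↔ ∃ j < parts.length, v = PySem.Chars.join ['-'] (parts.drop j) := by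
  simp only [List.mem_map, List.mem_range]
  constructor
  · rintro ⟨k, hk, rfl⟩; exact ⟨k, hk, rfl⟩
  · rintro ⟨j, hj, rfl⟩; exact ⟨j, hj, rfl⟩

theorem pv_memB_pref (parts : List (List Char)) (hne : parts ≠ []) (v : List Char) :
    (v ∈ pvPrefChain (parts.headD []) parts.tail)
      ↔ ∃ i < parts.length, v = PySem.Chars.join ['-'] (parts.take (i + 1)) := by
  cases parts with
  | nil => exact absurd rfl hne
  | cons p0 rest =>
      rw [List.headD_cons, List.tail_cons, pv_prefChain_eq]
      simp only [List.mem_map, List.mem_range, List.length_cons]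
      constructor
      · rintro ⟨k, hk, rfl⟩
        exact ⟨k, by omega, by rw [List.take_succ_cons]⟩
      · rintro ⟨i, hi, rfl⟩
        exact ⟨i, by omega, by rw [List.take_succ_cons]⟩

theorem pv_mem_take (parts : List (List Char)) (v : List Char) :
    (v ∈ (List.range parts.length).map
        (fun k => PySem.Chars.join ['-'] (parts.take (k + 1))))
      ↔ ∃ i < parts.length, v = PySem.Chars.join ['-'] (parts.take (i + 1)) := by
  simp only [List.mem_map, List.mem_range]
  constructor
  · rintro ⟨k, hk, rfl⟩; exact ⟨k, hk, rfl⟩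
  · rintro ⟨i, hi, rfl⟩; exact ⟨i, hi, rfl⟩

theorem pv_sorted_eq (VA VB K : List (List Char))
    (hna : VA.Nodup) (hnb : VB.Nodup) (hm : ∀ v, v ∈ VA ↔ v ∈ VB)
    (hnk : K.Nodup) (hmk : ∀ v, v ∈ K ↔ v ∈ VA)
    (hpw : K.Pairwise (fun a b => a.length ≠ b.length)) :
    PySem.List.sorted VA (fun v => v.length) true
      = PySem.List.sorted VB (fun v => v.length) true := by
  have permAB : VA.Perm VB := (List.perm_ext_iff_of_nodup hna hnb).2 hm
  have hysA : (PySem.List.sorted VA (fun v => v.length) true).Perm VA :=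
    PySem.List.sorted_perm VA (fun v => v.length) true
  have hKys : K.Perm (PySem.List.sorted VA (fun v => v.length) true) :=
    ((List.perm_ext_iff_of_nodup hnk hna).2 hmk).trans hysA.symm
  have hne : (PySem.List.sorted VA (fun v => v.length) true).Pairwise
      (fun a b => a.length ≠ b.length) :=
    (hKys.pairwise_iff (fun h => h.symm)).1 hpw
  have hle := PySem.List.sorted_pairwise_rev VA (fun v => v.length)
  have hgt : (PySem.List.sorted VA (fun v => v.length) true).Pairwise
      (fun a b => b.length < a.length) :=
    (hle.and hne).imp (fun h => lt_of_le_of_ne h.1 (fun e => h.2 e.symm))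
  exact (PySem.List.sorted_rev_eq_of_perm_of_pairwise_gt VB _ _
    (hysA.trans permAB) hgt).symm

-- ===== VERDICT (by name: the statement is the Claim_ definition above) =====
theorem get_search_variants_spec : Claim_equal_get_search_variants := by
  intro text _ hpre
  unfold Spec_get_search_variants
  by_cases h : text.toList = []
  · simp [get_search_variants, get_search_variants_alt, h]
  · unfold Pre_get_search_variants at hpre
    simp only [get_search_variants, get_search_variants_alt, if_neg h]
    rw [← PySem.Set.update_map_eq_foldl_add, ← PySem.Set.update_map_eq_foldl_add]
    rw [PySem.Set.update_empty, ← PySem.Set.ofList_append, pv_candA_pref, pv_candA_suf,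
        PySem.List.dedup_eq_ofList]
    set parts := PySem.Chars.splitOn text.toList ['-'] with hp
    by_cases hparts : parts = []
    · rw [hparts]
      decide
    · have hmem : ∀ v : List Char,
          (v ∈ (List.range parts.length).map
              (fun k => PySem.Chars.join ['-'] (parts.take (parts.length - k)))
            ++ (List.range parts.length).map
              (fun k => PySem.Chars.join ['-'] (parts.drop k)))
          ↔ (v ∈ pvPrefChain (parts.headD []) parts.tail
            ++ pvSufChain (parts.getLastD []) parts.dropLast.reverse) := by
        intro v
        rw [List.mem_append, List.mem_append, pv_memA_pref parts hparts,
            pv_memA_drop, pv_memB_pref parts hparts, pv_sufChain_eq,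
            pv_memB_suf parts hparts]
      have hmemP : ∀ v : List Char,
          (v ∈ pvCand text)
          ↔ (v ∈ (List.range parts.length).map
              (fun k => PySem.Chars.join ['-'] (parts.take (parts.length - k)))
            ++ (List.range parts.length).map
              (fun k => PySem.Chars.join ['-'] (parts.drop k))) := by
        intro v
        simp only [pvCand]
        rw [← hp]
        rw [List.mem_append, List.mem_append, pv_memA_pref parts hparts,
            pv_memA_drop, pv_mem_take]
      congr 1
      apply pv_sorted_eq _ _ (pvKeep text)
      · exact PySem.Set.nodup_ofList _
      · exact (PySem.Set.nodup_ofList _).filter _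
      · intro v
        simp only [PySem.Set.mem_ofList, List.mem_filter]
        rw [hmem v]
      · exact (PySem.Set.nodup_ofList _).filter _
      · intro v
        unfold pvKeep
        simp only [PySem.Set.mem_ofList, List.mem_filter]
        rw [hmemP v, hmem v]
      · exact hpre
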